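-- pv_equiv track=rewrite | github.com/Bobcatsoap/jy-server | cell/RoomType13Calculator.py | find_planeWithNone
-- ===== SOURCE A (Python) =====
-- def _find_bigger_continues_single(pre_cards, card2):
--     """
--     查找更大的连，
--     """
--     itm_cards = []
--     len_pre_cards = len(pre_cards)
--     index = 0
--     while index + len_pre_cards <= len(card2):
--         itm_cards_00 = card2[index:(index + len_pre_cards)]
--         if itm_cards_00[-1] != 15 and itm_cards_00[-1] > pre_cards[-1]:
--             if itm_cards_00[0] + len(itm_cards_00) - 1 == itm_cards_00[-1]:
--                 itm_cards.append(itm_cards_00)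
--         index += 1
--     return itm_cards
--
-- def find_planeWithNone(card1, card2, room_info):
--     """
--     找大于指定牌的3张飞机
--     """
--     if len(card2) < len(card1):
--         return []
--     card_1_plane = []
--     card_2_plane = []
--     for value_s in card1:
--         if card1.count(value_s) >= 3 and value_s not in card_1_plane:
--             card_1_plane.append(value_s)
--     card_1_plane.sort()
--     for value_s in card2:
--         if card2.count(value_s) >= 3 and value_s not in card_2_plane:
--             card_2_plane.append(value_s)
--     card_2_plane.sort()
--
--     itm_cards = []
--     itm_cards = _find_bigger_continues_single(card_1_plane, card_2_plane)
--     for v in itm_cards: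
--         v *= 3
--     return itm_cards
-- ===== SOURCE B (Python) =====
-- def _plane_values(cards):
--     return sorted({v for v in cards if cards.count(v) >= 3})
--
-- def _ok(v, top1, L, s):
--     return v != 15 and v > top1 and all(v - k in s for k in range(L))
--
-- def find_planeWithNone(card1, card2, room_info):
--     if len(card2) < len(card1):
--         return []
--     planes1 = _plane_values(card1)
--     planes2 = _plane_values(card2)
--     L = len(planes1)
--     top1 = planes1[-1]
--     s = set(planes2)
--     result = []
--     for v in planes2:
--         if _ok(v, top1, L, s):
--             result.append(list(range(v - L + 1, v + 1)) * 3)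
--     return result
-- ===== Notes on version B (the rewrite author's own statement) =====
-- stated objective: alternative
-- what changed: A slides a contiguous window of length len(card1_planes) over the sorted plane list and tests first+len-1==last on each slice; B instead puts card2's plane values in a set and, for each candidate endpoint v, checks the whole run v-L+1..v by set membership, emitting list(range(v-L+1,v+1))*3 directly.
import Mathlib
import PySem

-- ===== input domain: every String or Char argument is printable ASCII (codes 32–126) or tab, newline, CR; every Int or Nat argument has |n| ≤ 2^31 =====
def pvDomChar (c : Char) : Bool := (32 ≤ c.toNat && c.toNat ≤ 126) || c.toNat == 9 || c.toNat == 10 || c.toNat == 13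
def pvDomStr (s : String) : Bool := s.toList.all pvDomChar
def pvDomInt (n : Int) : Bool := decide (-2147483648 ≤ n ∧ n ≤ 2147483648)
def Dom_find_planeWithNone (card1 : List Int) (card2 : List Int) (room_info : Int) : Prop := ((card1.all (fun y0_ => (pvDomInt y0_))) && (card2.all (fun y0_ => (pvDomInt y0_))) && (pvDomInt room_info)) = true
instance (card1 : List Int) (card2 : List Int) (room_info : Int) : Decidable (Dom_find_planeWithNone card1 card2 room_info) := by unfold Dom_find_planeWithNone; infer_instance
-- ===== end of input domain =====

-- B replaces A's sliding-window scan over contiguous slices of the sorted plane list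
-- by a set-membership test on run endpoints (objective: alternative algorithm, similar cost).


-- ===== PORT A =====
-- the while-loop of _find_bigger_continues_single, step for step
def pvA_loop (pre_cards : List Int) (card2 : List Int) (index : Nat) (acc : List (List Int)) : List (List Int) :=
  if h : index + pre_cards.length ≤ card2.length then
    let itm := PySem.List.slice card2 (some (index : Int)) (some ((index : Int) + (pre_cards.length : Int)))
    match PySem.List.pyGet? itm (-1), PySem.List.pyGet? pre_cards (-1) with
    | some last, some plast =>
        pvA_loop pre_cards card2 (index + 1)
          (if last ≠ 15 ∧ plast < last then
             (match PySem.List.pyGet? itm 0 with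
              | some first => if first + (itm.length : Int) - 1 = last then acc ++ [itm] else acc
              | none => acc)
           else acc)
    | _, _ => acc   -- Python raises IndexError here (empty plane list); excluded by Pre_
  else acc
termination_by card2.length + 1 - index
decreasing_by omega

def find_planeWithNone (card1 : List Int) (card2 : List Int) (room_info : Int) : List (List Int) :=
  if card2.length < card1.length then []
  else
    let c1p := card1.foldl (fun acc v => if 3 ≤ PySem.List.count card1 v ∧ v ∉ acc then acc ++ [v] else acc) []
    let card_1_plane := PySem.List.sorted c1p (fun x => x) false
    let c2p := card2.foldl (fun acc v => if 3 ≤ PySem.List.count card2 v ∧ v ∉ acc then acc ++ [v] else acc) []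
    let card_2_plane := PySem.List.sorted c2p (fun x => x) false
    let itm_cards := pvA_loop card_1_plane card_2_plane 0 []
    itm_cards.map (fun v => v ++ v ++ v)   -- v *= 3 on a list

-- ===== PORT B =====
def pvB_planes (cards : List Int) : List Int :=
  PySem.List.sorted (PySem.Set.ofList (cards.filter (fun v => decide (3 ≤ PySem.List.count cards v)))) (fun x => x) false

def pvB_ok (v top1 : Int) (L : Nat) (s : List Int) : Bool :=
  decide (v ≠ 15) && decide (top1 < v) && (List.range L).all (fun k => decide ((v - (k : Int)) ∈ s))

def find_planeWithNone_alt (card1 : List Int) (card2 : List Int) (room_info : Int) : List (List Int) :=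
  if card2.length < card1.length then []
  else
    let planes1 := pvB_planes card1
    let planes2 := pvB_planes card2
    let L := planes1.length
    match PySem.List.pyGet? planes1 (-1) with
    | none => []    -- Python B raises IndexError here, as A does; excluded by Pre_
    | some top1 =>
      let s := PySem.Set.ofList planes2
      planes2.foldl (fun result v =>
        if pvB_ok v top1 L s then
          result ++ [PySem.List.pyRange (v - (L : Int) + 1) (v + 1) 1
                      ++ PySem.List.pyRange (v - (L : Int) + 1) (v + 1) 1
                      ++ PySem.List.pyRange (v - (L : Int) + 1) (v + 1) 1]
        else result) []

-- ===== PRECONDITION & SPEC =====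
-- Pre_ excludes exactly the inputs where A (and B alike) raises IndexError: card2 at least as
-- long as card1 but card1 containing no value of multiplicity >= 3 (empty plane list, so
-- card_1_plane[-1] / planes1[-1] raises).
def Pre_find_planeWithNone (card1 : List Int) (card2 : List Int) (room_info : Int) : Prop :=
  card2.length < card1.length ∨ ∃ v ∈ card1, 3 ≤ PySem.List.count card1 v
instance (card1 : List Int) (card2 : List Int) (room_info : Int) : Decidable (Pre_find_planeWithNone card1 card2 room_info) := by unfold Pre_find_planeWithNone; infer_instance

def pvWitness_find_planeWithNone : List Int × List Int × Int := ([3, 3, 3], [4, 4, 4, 5, 5, 5], 0)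

def Spec_find_planeWithNone (card1 : List Int) (card2 : List Int) (room_info : Int) (out : List (List Int)) : Prop := out = find_planeWithNone_alt card1 card2 room_info
instance (card1 : List Int) (card2 : List Int) (room_info : Int) (out : List (List Int)) : Decidable (Spec_find_planeWithNone card1 card2 room_info out) := by unfold Spec_find_planeWithNone; infer_instance

-- ===== CLAIM (what is proved, stated in full; the proofs are below) =====
def Claim_equal_find_planeWithNone : Prop := ∀ (card1 : List Int) (card2 : List Int) (room_info : Int), Dom_find_planeWithNone card1 card2 room_info → Pre_find_planeWithNone card1 card2 room_info → Spec_find_planeWithNone card1 card2 room_info (find_planeWithNone card1 card2 room_info)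

-- ===== LEMMAS AND PROOFS =====

-- A's duplicate-skipping append loop builds Set.ofList of the filtered list
theorem pv_fold_eq_ofList (cards l : List Int) (acc : List Int) :
    l.foldl (fun acc v => if 3 ≤ PySem.List.count cards v ∧ v ∉ acc then acc ++ [v] else acc) acc
      = (l.filter (fun v => decide (3 ≤ PySem.List.count cards v))).foldl PySem.Set.add acc := by
  induction l generalizing acc with
  | nil => rfl
  | cons x t ih =>
    simp only [List.foldl_cons, List.filter_cons, PySem.List.count_eq] at *
    by_cases hc : 3 ≤ List.count x cards
    · by_cases hm : x ∈ acc <;>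
        simp [hc, hm, PySem.Set.add, PySem.Set.contains, ih]
    · simp [hc, ih]

theorem pv_gap (q : List Int) (hq : q.Pairwise (· < ·)) (i k : Nat) (h : i + k < q.length) :
    q[i]'(by omega) + (k : Int) ≤ q[i + k]'h := by
  induction k with
  | zero => simp
  | succ k ih =>
    have h1 : i + k < q.length := by omega
    have h2 := ih h1
    have h3 : q[i+k]'h1 < q[i + (k+1)]'h :=
      (List.pairwise_iff_getElem.mp hq) _ _ h1 h (by omega)
    push_cast at *
    omega

theorem pv_mono (q : List Int) (hq : q.Pairwise (· < ·)) (m n : Nat) (hmn : m ≤ n) (hn : n < q.length) :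
    q[m]'(by omega) ≤ q[n]'hn := by
  rcases Nat.lt_or_ge m n with h | h
  · exact le_of_lt ((List.pairwise_iff_getElem.mp hq) _ _ (by omega) hn h)
  · have : m = n := by omega
    subst this; rfl

theorem pv_pos (q : List Int) (hq : q.Pairwise (· < ·)) (j : Nat) (hj : j < q.length) (k : Nat)
    (hmem : ∀ m : Nat, m ≤ k → q[j]'hj - (m : Int) ∈ q) :
    k ≤ j ∧ q[j - k]'(by omega) = q[j]'hj - (k : Int) := by
  induction k with
  | zero => simp
  | succ k ih =>
    obtain ⟨hkj, hval⟩ := ih (fun m hm => hmem m (by omega))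
    obtain ⟨m, hm, hqm⟩ := List.mem_iff_getElem.mp (hmem (k+1) le_rfl)
    have hlt : q[m]'hm < q[j-k]'(by omega) := by
      rw [hqm, hval]; push_cast; omega
    have hmjk : m < j - k := by
      by_contra hge
      have := pv_mono q hq (j-k) m (by omega) hm
      omega
    have hk1j : k + 1 ≤ j := by omega
    have hle : q[m]'hm ≤ q[j-(k+1)]'(by omega) := pv_mono q hq m (j-(k+1)) (by omega) (by omega)
    have hlt2 : q[j-(k+1)]'(by omega) < q[j-k]'(by omega) :=
      (List.pairwise_iff_getElem.mp hq) _ _ (by omega) (by omega) (by omega)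
    refine ⟨hk1j, ?_⟩
    rw [hqm] at hle
    rw [hval] at hlt2
    push_cast at *
    omega

theorem pvB_ok_iff (v top1 : Int) (L : Nat) (s : List Int) :
    pvB_ok v top1 L s = true ↔ v ≠ 15 ∧ top1 < v ∧ ∀ k : Nat, k < L → v - (k : Int) ∈ s := by
  simp [pvB_ok, List.mem_range, and_assoc]

-- consecutive-run characterisation: if the window is consecutive, every element is first + offset
theorem pv_run (q : List Int) (hq : q.Pairwise (· < ·)) (i L : Nat) (hL : 1 ≤ L)
    (hiL : i + L ≤ q.length)
    (hcons : q[i]'(by omega) + (L : Int) - 1 = q[i + (L-1)]'(by omega)) :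
    ∀ (k : Nat), (hk : k ≤ L - 1) → q[i + k]'(by omega) = q[i]'(by omega) + (k : Int) := by
  intro k hk
  have h1 : q[i]'(by omega) + (k : Int) ≤ q[i+k]'(by omega) := pv_gap q hq i k (by omega)
  have h2 : q[i+k]'(by omega) + ((L-1-k : Nat) : Int) ≤ q[i + (L-1)]'(by omega) := by
    have h2a := pv_gap q hq (i+k) (L-1-k) (by omega)
    rwa [getElem_congr_idx (show (i+k) + (L-1-k) = i + (L-1) from by omega)] at h2a
  have hc1 : ((L-1-k : Nat) : Int) = (L : Int) - 1 - (k : Int) := by omega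
  rw [hc1] at h2
  omega

theorem pv_loop_eq (p1 q : List Int) (hp : p1 ≠ []) (hq : q.Pairwise (· < ·)) (top1 : Int)
    (htop : PySem.List.pyGet? p1 (-1) = some top1) (i : Nat) (acc : List (List Int)) :
    pvA_loop p1 q i acc
      = acc ++ ((q.drop (i + p1.length - 1)).filter
            (fun v => pvB_ok v top1 p1.length (PySem.Set.ofList q))).map
          (fun v => PySem.List.pyRange (v - (p1.length : Int) + 1) (v + 1) 1) := by
  have hL : 1 ≤ p1.length := List.length_pos_of_ne_nil hp
  suffices h : ∀ n i acc, q.length + 1 - i ≤ n → pvA_loop p1 q i acc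
      = acc ++ ((q.drop (i + p1.length - 1)).filter
            (fun v => pvB_ok v top1 p1.length (PySem.Set.ofList q))).map
          (fun v => PySem.List.pyRange (v - (p1.length : Int) + 1) (v + 1) 1) by
    exact h (q.length + 1) i acc (by omega)
  intro n
  induction n with
  | zero =>
    intro i acc hfuel
    rw [pvA_loop, dif_neg (by omega), List.drop_eq_nil_of_le (by omega)]
    simp
  | succ n ih =>
    intro i acc hfuel
    rw [pvA_loop]
    by_cases h : i + p1.length ≤ q.length
    case neg =>
      rw [dif_neg (by omega), List.drop_eq_nil_of_le (by omega)]
      simp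
    case pos =>
      rw [dif_pos (by omega)]
      have hitm : PySem.List.slice q (some (i : Int)) (some ((i : Int) + (p1.length : Int)))
          = (q.drop i).take p1.length := PySem.List.slice_natCast_add q i p1.length
      simp only [hitm, htop]
      set w := (q.drop i).take p1.length with hwdef
      have hwlen : w.length = p1.length := by
        simp [hwdef]; omega
      have hwget : ∀ (k : Nat) (hk : k < p1.length), w[k]'(by omega) = q[i+k]'(by omega) := by
        intro k hk
        simp [hwdef]
      have hj : i + (p1.length-1) < q.length := by omega
      have hlast : PySem.List.pyGet? w (-1) = some (q[i + (p1.length-1)]'hj) := by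
        rw [PySem.List.pyGet?_neg_one, List.getLast?_eq_getElem?,
            List.getElem?_eq_getElem (by omega)]
        rw [hwget (w.length - 1) (by omega),
            getElem_congr_idx (show i + (w.length - 1) = i + (p1.length - 1) from by
              rw [hwlen])]
      have hget0 : PySem.List.pyGet? w 0 = some (q[i]'(by omega)) := by
        rw [PySem.List.pyGet?_zero, List.getElem?_eq_getElem (by omega)]
        rw [hwget 0 (by omega), getElem_congr_idx (Nat.add_zero i)]
      simp only [hlast, hget0, hwlen]
      have hdrop : q.drop (i + p1.length - 1)
          = q[i + (p1.length-1)]'hj :: q.drop (i + (p1.length-1) + 1) := by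
        rw [show i + p1.length - 1 = i + (p1.length-1) from by omega]
        exact List.drop_eq_getElem_cons hj
      rw [hdrop, List.filter_cons]
      -- equivalence of A's window test with B's endpoint test
      have hcond : pvB_ok (q[i + (p1.length-1)]'hj) top1 p1.length (PySem.Set.ofList q) = true
          ↔ q[i + (p1.length-1)]'hj ≠ 15 ∧ top1 < q[i + (p1.length-1)]'hj
              ∧ q[i]'(by omega) + (p1.length : Int) - 1 = q[i + (p1.length-1)]'hj := by
        rw [pvB_ok_iff]
        constructor
        · rintro ⟨h15, htp, hmem⟩
          refine ⟨h15, htp, ?_⟩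
          obtain ⟨-, hval⟩ := pv_pos q hq (i + (p1.length-1)) hj (p1.length-1)
            (fun m hm => by
              have hv := hmem m (by omega)
              rwa [PySem.Set.mem_ofList] at hv)
          rw [getElem_congr_idx (show i + (p1.length-1) - (p1.length-1) = i from by omega)] at hval
          rw [hval]
          omega
        · rintro ⟨h15, htp, hcons⟩
          refine ⟨h15, htp, ?_⟩
          intro k hk
          rw [PySem.Set.mem_ofList]
          have hr := pv_run q hq i p1.length hL (by omega) hcons (p1.length-1-k) (by omega)
          have hv : q[i + (p1.length-1)]'hj - (k : Int) = q[i + (p1.length-1-k)]'(by omega) := by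
            rw [hr, ← hcons]
            omega
          rw [hv]
          exact List.getElem_mem _
      cases hb : pvB_ok (q[i + (p1.length-1)]'hj) top1 p1.length (PySem.Set.ofList q)
      case false =>
        have hacc : (if q[i + (p1.length-1)]'hj ≠ 15 ∧ top1 < q[i + (p1.length-1)]'hj then
             (if q[i]'(by omega) + (p1.length : Int) - 1 = q[i + (p1.length-1)]'hj
              then acc ++ [w] else acc)
           else acc) = acc := by
          by_cases h1 : q[i + (p1.length-1)]'hj ≠ 15 ∧ top1 < q[i + (p1.length-1)]'hj
          · rw [if_pos h1, if_neg]
            intro hcons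
            have hbt := hcond.mpr ⟨h1.1, h1.2, hcons⟩
            rw [hb] at hbt
            exact absurd hbt (by simp)
          · rw [if_neg h1]
        rw [hacc, ih (i+1) acc (by omega),
            show i + 1 + p1.length - 1 = i + (p1.length-1) + 1 from by omega]
        simp
      case true =>
        obtain ⟨h15, htp, hcons⟩ := hcond.mp hb
        have hw : w = PySem.List.pyRange (q[i + (p1.length-1)]'hj - (p1.length : Int) + 1)
            (q[i + (p1.length-1)]'hj + 1) 1 := by
          apply List.ext_getElem
          · rw [hwlen, PySem.List.length_pyRange_one]
            omega
          · intro k hk1 hk2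
            rw [hwlen] at hk1
            rw [hwget k hk1, PySem.List.getElem_pyRange_one]
            rw [pv_run q hq i p1.length hL (by omega) hcons k (by omega)]
            omega
        rw [if_pos ⟨h15, htp⟩, if_pos hcons,
            ih (i+1) (acc ++ [w]) (by omega),
            show i + 1 + p1.length - 1 = i + (p1.length-1) + 1 from by omega,
            hw]
        simp

-- elements before position L-1 of q can never end a run of length L inside q
theorem pv_head_filter (q : List Int) (hq : q.Pairwise (· < ·)) (top1 : Int) (L : Nat) (hL : 1 ≤ L) :
    q.filter (fun v => pvB_ok v top1 L (PySem.Set.ofList q))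
      = (q.drop (L - 1)).filter (fun v => pvB_ok v top1 L (PySem.Set.ofList q)) := by
  have hsplit : ∀ P : Int → Bool, q.filter P = (q.take (L-1)).filter P ++ (q.drop (L-1)).filter P := by
    intro P
    conv_lhs => rw [← List.take_append_drop (L-1) q]
    rw [List.filter_append]
  rw [hsplit]
  suffices hnil : (q.take (L-1)).filter (fun v => pvB_ok v top1 L (PySem.Set.ofList q)) = [] by
    rw [hnil, List.nil_append]
  rw [List.filter_eq_nil_iff]
  intro v hv
  obtain ⟨j, hj, hvj⟩ := List.mem_iff_getElem.mp hv
  have hjL : j < L - 1 := by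
    have := List.length_take_le (L-1) q
    omega
  have hjlen : j < q.length := by
    rw [List.length_take] at hj
    omega
  have hvq : v = q[j]'hjlen := by
    rw [← hvj, List.getElem_take]
  by_contra hbt
  obtain ⟨-, -, hmem⟩ := (pvB_ok_iff _ _ _ _).mp hbt
  obtain ⟨hle, -⟩ := pv_pos q hq j hjlen (L-1) (fun m hm => by
    have hx := hmem m (by omega)
    rwa [PySem.Set.mem_ofList, hvq] at hx)
  omega

-- ===== VERDICT (by name: the statement is the Claim_ definition above) =====
theorem find_planeWithNone_spec : Claim_equal_find_planeWithNone := by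
  unfold Claim_equal_find_planeWithNone
  intro card1 card2 room_info hdom hpre
  unfold Spec_find_planeWithNone find_planeWithNone find_planeWithNone_alt
  by_cases hlen : card2.length < card1.length
  · simp [hlen]
  · simp only [if_neg hlen]
    have e1 : PySem.List.sorted
        (card1.foldl (fun acc v => if 3 ≤ PySem.List.count card1 v ∧ v ∉ acc then acc ++ [v] else acc) [])
        (fun x => x) false = pvB_planes card1 := by
      rw [pv_fold_eq_ofList, pvB_planes, PySem.Set.ofList_eq_foldl]
    have e2 : PySem.List.sorted
        (card2.foldl (fun acc v => if 3 ≤ PySem.List.count card2 v ∧ v ∉ acc then acc ++ [v] else acc) [])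
        (fun x => x) false = pvB_planes card2 := by
      rw [pv_fold_eq_ofList, pvB_planes, PySem.Set.ofList_eq_foldl]
    simp only [e1, e2]
    have hne : pvB_planes card1 ≠ [] := by
      obtain ⟨v, hv, hc⟩ := hpre.resolve_left hlen
      rw [pvB_planes, Ne, PySem.List.sorted_eq_nil_iff]
      intro hempty
      have : v ∈ PySem.Set.ofList (card1.filter (fun v => decide (3 ≤ PySem.List.count card1 v))) := by
        rw [PySem.Set.mem_ofList, List.mem_filter]
        exact ⟨hv, by simpa using hc⟩
      rw [hempty] at this
      exact absurd this (List.not_mem_nil)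
    obtain ⟨top1, htop⟩ : ∃ t, PySem.List.pyGet? (pvB_planes card1) (-1) = some t := by
      rw [PySem.List.pyGet?_neg_one]
      exact Option.isSome_iff_exists.mp (List.getLast?_isSome.mpr hne)
    simp only [htop]
    have hq2 : (pvB_planes card2).Pairwise (· < ·) := by
      rw [pvB_planes]
      exact PySem.List.sorted_ofList_pairwise_lt _
    rw [pv_loop_eq (pvB_planes card1) (pvB_planes card2) hne hq2 top1 htop 0 []]
    rw [PySem.List.foldl_append_if]
    rw [pv_head_filter (pvB_planes card2) hq2 top1 (pvB_planes card1).length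
        (List.length_pos_of_ne_nil hne)]
    simp [List.map_map, Function.comp]
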